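-- pv_equiv track=rewrite | github.com/shreyas20063/SCOPE | backend/simulations/block_diagram_builder.py | _tokenize_polynomial
-- ===== SOURCE A (Python) =====
-- from typing import Any, Dict, List, Optional, Tuple
--
-- def _tokenize_polynomial(poly_str: str, var: str) -> List[str]:
--     """Split polynomial string into signed terms.
--
--     Handles expressions like:
--       '1 - 0.5R'     -> ['1', '-0.5R']
--       's^2 + 3s + 1' -> ['s^2', '3s', '1']
--       '-s^2 + 3s'    -> ['-s^2', '3s']
--       '4658s^2 + s'  -> ['4658s^2', 's']
--
--     Correctly preserves signs on exponents like s^-1.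
--     """
--     terms = []
--     current = ""
--     i = 0
--     s = poly_str.strip()
--
--     while i < len(s):
--         ch = s[i]
--
--         if ch in ('+', '-') and i > 0:
--             # Check if this +/- is part of an exponent (e.g., s^-1)
--             # Look back to see if preceded by '^' (possibly with spaces)
--             j = i - 1
--             while j >= 0 and s[j] == ' ':
--                 j -= 1
--             if j >= 0 and s[j] == '^':
--                 # This sign is part of an exponent — don't split
--                 current += ch
--                 i += 1
--                 continue
--
--             # This is a term separator
--             if current.strip():
--                 terms.append(current.strip())
--             current = ch if ch == '-' else ""
--             i += 1
--             continue
--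
--         current += ch
--         i += 1
--
--     if current.strip():
--         terms.append(current.strip())
--
--     return terms
-- ===== SOURCE B (Python) =====
-- def _tokenize_polynomial(poly_str: str, var: str):
--     """Split polynomial string into signed terms (cut-point/segment version)."""
--     s = poly_str.strip()
--     n = len(s)
--     # Pass 1: indices of real term separators ('+'/'-' at i>0 not preceded,
--     # space-skipping, by '^').
--     cuts = []
--     for i in range(1, n):
--         if s[i] in ('+', '-'):
--             before = s[:i].rstrip(' ')
--             if not (before and before[-1] == '^'):
--                 cuts.append(i)
--     # Pass 2: cut the string into segments at those indices.
--     bounds = cuts + [n]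
--     segments = []
--     prev = 0
--     for b in bounds:
--         segments.append(s[prev:b])
--         prev = b
--     # Pass 3: sign-adjust (drop a leading '+', keep '-'), strip, keep nonempty.
--     terms = []
--     t = segments[0].strip()
--     if t:
--         terms.append(t)
--     for seg in segments[1:]:
--         body = seg[1:] if seg.startswith('+') else seg
--         t = body.strip()
--         if t:
--             terms.append(t)
--     return terms
-- ===== Notes on version B (the rewrite author's own statement) =====
-- stated objective: alternative
-- what changed: A's single-pass character accumulator (building 'current' char by char with an index-lookback while-loop) is replaced by a three-pass decomposition: collect the separator indices, slice the string into segments at those cut points, then sign-adjust and strip each segment.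
import Mathlib
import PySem

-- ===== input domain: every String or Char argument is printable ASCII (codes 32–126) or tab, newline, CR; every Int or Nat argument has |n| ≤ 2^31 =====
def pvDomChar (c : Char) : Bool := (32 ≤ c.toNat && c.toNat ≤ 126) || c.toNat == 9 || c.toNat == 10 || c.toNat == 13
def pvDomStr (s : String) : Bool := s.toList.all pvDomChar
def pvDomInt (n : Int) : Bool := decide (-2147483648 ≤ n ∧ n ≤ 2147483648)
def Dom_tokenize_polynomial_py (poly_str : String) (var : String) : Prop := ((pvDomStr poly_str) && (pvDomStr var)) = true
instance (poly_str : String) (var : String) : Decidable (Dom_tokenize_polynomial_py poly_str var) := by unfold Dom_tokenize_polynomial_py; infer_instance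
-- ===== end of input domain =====

-- B replaces A's single-pass character accumulator by a three-pass decomposition
-- (collect separator indices, slice the string into segments at them, sign-adjust
-- and strip each segment); objective: alternative structure (also measured faster).

-- ===== PORT A =====
-- the inner 'while j >= 0 and s[j] == " ": j -= 1; return j >= 0 and s[j] == "^"'
-- lookback; the Nat argument encodes j+1 (0 stands for j = -1)
def pvLookbackA (cs : List Char) : Nat → Bool
  | 0 => false
  | j + 1 => if cs.getD j '?' = ' ' then pvLookbackA cs j else decide (cs.getD j '?' = '^')

-- the main 'while i < len(s)' loop of A, carrying (terms, current)
def pvLoopA (cs : List Char) (i : Nat) (terms : List String) (current : List Char) : List String :=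
  if _h : i < cs.length then
    -- ch := s[i]
    if (cs.getD i '?' = '+' ∨ cs.getD i '?' = '-') ∧ 0 < i then
      if pvLookbackA cs i then
        pvLoopA cs (i + 1) terms (current ++ [cs.getD i '?'])
      else
        pvLoopA cs (i + 1)
          (if PySem.Chars.strip current ≠ [] then terms ++ [String.ofList (PySem.Chars.strip current)] else terms)
          (if cs.getD i '?' = '-' then [cs.getD i '?'] else [])
    else
      pvLoopA cs (i + 1) terms (current ++ [cs.getD i '?'])
  else
    if PySem.Chars.strip current ≠ [] then terms ++ [String.ofList (PySem.Chars.strip current)] else terms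
termination_by cs.length - i

def tokenize_polynomial_py (poly_str : String) (var : String) : List String :=
  pvLoopA (PySem.Chars.strip poly_str.toList) 0 [] []

-- ===== PORT B =====
-- s.rstrip(' ') — hand port (PySem.Chars.rstrip strips all whitespace, Python here only ' '); exact
def pvRstripSp (cs : List Char) : List Char := (cs.reverse.dropWhile (· == ' ')).reverse

-- pass 1 of B: the list of real separator indices ('for i in range(1, n): … cuts.append(i)');
-- List.range' 1 (n-1) = range(1, n) exactly (indices are Nat, n = len(s))
def pvCutsB (cs : List Char) : List Nat :=
  (List.range' 1 (cs.length - 1)).foldl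
    (fun acc i =>
      if cs.getD i '?' = '+' ∨ cs.getD i '?' = '-' then
        let before := pvRstripSp (cs.take i)
        if ¬ (before ≠ [] ∧ before.getLastD '?' = '^') then acc ++ [i] else acc
      else acc) []

def tokenize_polynomial_py_alt (poly_str : String) (var : String) : List String :=
  let cs := PySem.Chars.strip poly_str.toList
  let n := cs.length
  let bounds := pvCutsB cs ++ [n]
  -- pass 2: 'for b in bounds: segments.append(s[prev:b]); prev = b';
  -- s[prev:b] = (cs.drop prev).take (b - prev), exact since 0 ≤ prev ≤ b ≤ n here
  let segments := (bounds.foldl (fun (acc : List (List Char) × Nat) b =>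
      (acc.1 ++ [(cs.drop acc.2).take (b - acc.2)], b)) ([], 0)).1
  -- pass 3: first segment kept as is, later ones drop a leading '+'
  let t0 := PySem.Chars.strip (segments.headD [])
  let terms0 := if t0 ≠ [] then [String.ofList t0] else []
  segments.tail.foldl (fun terms seg =>
    let body := if seg.headD '?' = '+' then seg.tail else seg
    let t := PySem.Chars.strip body
    if t ≠ [] then terms ++ [String.ofList t] else terms) terms0

-- ===== PRECONDITION & SPEC =====
def Spec_tokenize_polynomial_py (poly_str : String) (var : String) (out : List String) : Prop := out = tokenize_polynomial_py_alt poly_str var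
instance (poly_str : String) (var : String) (out : List String) : Decidable (Spec_tokenize_polynomial_py poly_str var out) := by unfold Spec_tokenize_polynomial_py; infer_instance

-- ===== CLAIM (what is proved, stated in full; the proofs are below) =====
def Claim_equal_tokenize_polynomial_py : Prop := ∀ (poly_str : String) (var : String), Dom_tokenize_polynomial_py poly_str var → Spec_tokenize_polynomial_py poly_str var (tokenize_polynomial_py poly_str var)

-- ===== LEMMAS AND PROOFS =====

-- emit a stripped accumulator / segment as zero or one term
def pvEmit (cur : List Char) : List String :=
  if PySem.Chars.strip cur ≠ [] then [String.ofList (PySem.Chars.strip cur)] else []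

-- canonical separator test (A's view)
def pvSep (cs : List Char) (i : Nat) : Bool :=
  decide (0 < i) && (decide (cs.getD i '?' = '+') || decide (cs.getD i '?' = '-')) && !(pvLookbackA cs i)

def pvSign (cs : List Char) (c : Nat) : List Char := if cs.getD c '?' = '-' then ['-'] else []

-- canonical single-pass tokenizer (accumulator form, no terms list)
def pvTok (cs : List Char) (i : Nat) (cur : List Char) : List String :=
  if _h : i < cs.length then
    if pvSep cs i then
      pvEmit cur ++ pvTok cs (i + 1) (pvSign cs i)
    else
      pvTok cs (i + 1) (cur ++ [cs.getD i '?'])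
  else pvEmit cur
termination_by cs.length - i

def pvSeg (cs : List Char) (a b : Nat) : List Char := (cs.drop a).take (b - a)

-- segment-based tokenizer from a list of cut indices
def pvGo (cs : List Char) (cur : List Char) (i : Nat) : List Nat → List String
  | [] => pvEmit (cur ++ pvSeg cs i cs.length)
  | c :: rest => pvEmit (cur ++ pvSeg cs i c) ++ pvGo cs (pvSign cs c) (c + 1) rest

def pvCutsGE (cs : List Char) (i : Nat) : List Nat :=
  (List.range' i (cs.length - i)).filter (pvSep cs)

def pvSegsOf (cs : List Char) (p : Nat) : List Nat → List (List Char)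
  | [] => []
  | b :: rest => pvSeg cs p b :: pvSegsOf cs b rest

theorem pvLoopA_eq (cs : List Char) :
    ∀ k i terms cur, cs.length - i ≤ k →
      pvLoopA cs i terms cur = terms ++ pvTok cs i cur := by
  intro k
  induction k with
  | zero =>
    intro i terms cur h
    have hi : ¬ i < cs.length := by omega
    rw [pvLoopA, pvTok]
    simp only [dif_neg hi]
    by_cases hcur : PySem.Chars.strip cur ≠ [] <;> simp [pvEmit, hcur]
  | succ k ih =>
    intro i terms cur h
    by_cases hi : i < cs.length
    · rw [pvLoopA, pvTok]
      simp only [dif_pos hi]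
      by_cases h1 : (cs.getD i '?' = '+' ∨ cs.getD i '?' = '-') ∧ 0 < i
      · by_cases h2 : pvLookbackA cs i = true
        · have hs : pvSep cs i = false := by simp [pvSep, h2]
          rw [if_pos h1, if_pos h2, hs]
          simp only [Bool.false_eq_true, if_false]
          exact ih (i + 1) terms (cur ++ [cs.getD i '?']) (by omega)
        · have hs : pvSep cs i = true := by
            rcases h1.1 with hp | hp <;>
              simp [pvSep, hp, h1.2, h2, -List.getD_eq_getElem?_getD]
          rw [if_pos h1, if_neg h2]
          simp only [hs, if_true]
          rw [ih (i + 1) _ _ (by omega)]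
          have hnc : (if cs.getD i '?' = '-' then [cs.getD i '?'] else []) = pvSign cs i := by
            by_cases hm : cs.getD i '?' = '-' <;> simp [pvSign, hm, -List.getD_eq_getElem?_getD]
          rw [hnc]
          by_cases hcur : PySem.Chars.strip cur ≠ [] <;> simp [pvEmit, hcur]
      · have hs : pvSep cs i = false := by
          by_cases hz : 0 < i
          · have hpm : ¬(cs.getD i '?' = '+' ∨ cs.getD i '?' = '-') := fun hp => h1 ⟨hp, hz⟩
            obtain ⟨hp1, hp2⟩ := not_or.mp hpm
            simp [pvSep, hp1, hp2, -List.getD_eq_getElem?_getD]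
          · simp [pvSep, hz]
        rw [if_neg h1, hs]
        simp only [Bool.false_eq_true, if_false]
        exact ih (i + 1) terms (cur ++ [cs.getD i '?']) (by omega)
    · rw [pvLoopA, pvTok]
      simp only [dif_neg hi]
      by_cases hcur : PySem.Chars.strip cur ≠ [] <;> simp [pvEmit, hcur]


theorem pvRstripSp_append_single (l : List Char) (c : Char) :
    pvRstripSp (l ++ [c]) = if c = ' ' then pvRstripSp l else l ++ [c] := by
  by_cases hc : c = ' ' <;> simp [pvRstripSp, List.dropWhile_cons, hc]

theorem pvLookbackA_eq (cs : List Char) :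
    ∀ i, i ≤ cs.length →
      pvLookbackA cs i =
        (decide (pvRstripSp (cs.take i) ≠ []) && decide ((pvRstripSp (cs.take i)).getLastD '?' = '^')) := by
  intro i
  induction i with
  | zero => intro _; simp [pvLookbackA, pvRstripSp]
  | succ j ih =>
    intro h
    have hj : j < cs.length := by omega
    have hget : cs.getD j '?' = cs[j] := List.getD_eq_getElem cs '?' hj
    rw [List.take_succ, List.getElem?_eq_getElem hj]
    simp only [Option.toList_some, pvRstripSp_append_single]
    by_cases hc : cs[j] = ' '
    · simp only [pvLookbackA, hget, hc, if_pos rfl]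
      exact ih (by omega)
    · have hne : cs ≠ [] := by intro hnil; rw [hnil] at hj; simp at hj
      have h2 : (List.take j cs ++ [cs[j]]).getLastD '?' = cs[j] := by
        rw [List.getLastD_eq_getLast?, List.getLast?_concat]; rfl
      show (if cs.getD j '?' = ' ' then pvLookbackA cs j else decide (cs.getD j '?' = '^')) = _
      rw [hget, if_neg hc]
      simp only [if_neg hc, h2]
      simp [hne]

theorem pvCutsB_eq (cs : List Char) : pvCutsB cs = pvCutsGE cs 0 := by
  unfold pvCutsB
  have hfold :
      (List.range' 1 (cs.length - 1)).foldl
        (fun acc i =>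
          if cs.getD i '?' = '+' ∨ cs.getD i '?' = '-' then
            let before := pvRstripSp (cs.take i)
            if ¬ (before ≠ [] ∧ before.getLastD '?' = '^') then acc ++ [i] else acc
          else acc) []
      = (List.range' 1 (cs.length - 1)).foldl
        (fun acc i =>
          if ((cs.getD i '?' = '+' ∨ cs.getD i '?' = '-') ∧
              ¬ (pvRstripSp (cs.take i) ≠ [] ∧ (pvRstripSp (cs.take i)).getLastD '?' = '^'))
          then acc ++ [i] else acc) [] := by
    apply List.foldl_ext
    intro acc i _
    dsimp only
    split_ifs <;> first | rfl | tauto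
  rw [hfold, PySem.List.foldl_append_ite_eq_filter]
  simp only [List.nil_append]
  unfold pvCutsGE
  have hcong : ∀ i ∈ List.range' 1 (cs.length - 1),
      (decide ((cs.getD i '?' = '+' ∨ cs.getD i '?' = '-') ∧
        ¬ (pvRstripSp (cs.take i) ≠ [] ∧ (pvRstripSp (cs.take i)).getLastD '?' = '^')))
      = pvSep cs i := by
    intro i hi
    obtain ⟨h1, h2⟩ := List.mem_range'_1.mp hi
    have hle : i ≤ cs.length := by omega
    rw [pvSep, pvLookbackA_eq cs i hle]
    have hz : (0 : Nat) < i := by omega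
    simp [hz, Bool.decide_and, Bool.decide_or, decide_not, Bool.and_assoc]
  rw [List.filter_congr hcong]
  rcases Nat.eq_zero_or_pos cs.length with h0 | hpos
  · simp [h0]
  · obtain ⟨m, hm⟩ : ∃ m, cs.length = m + 1 := ⟨cs.length - 1, by omega⟩
    rw [hm]
    simp only [Nat.sub_zero, Nat.add_sub_cancel]
    rw [List.range'_succ]
    rw [List.filter_cons]
    have : pvSep cs 0 = false := by simp [pvSep]
    simp [this]

theorem pvSeg_self (cs : List Char) (a : Nat) : pvSeg cs a a = [] := by simp [pvSeg]

theorem pvSeg_cons (cs : List Char) {a b : Nat} (hab : a < b) (ha : a < cs.length) :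
    pvSeg cs a b = cs.getD a '?' :: pvSeg cs (a + 1) b := by
  unfold pvSeg
  rw [List.drop_eq_getElem_cons ha]
  obtain ⟨m, hm⟩ : ∃ m, b - a = m + 1 := ⟨b - a - 1, by omega⟩
  have hm' : b - (a + 1) = m := by omega
  rw [hm, hm', List.take_succ_cons, List.getD_eq_getElem cs '?' ha]

theorem pvCutsGE_len (cs : List Char) : pvCutsGE cs cs.length = [] := by
  simp [pvCutsGE]

theorem pvCutsGE_step (cs : List Char) {i : Nat} (hi : i < cs.length) :
    pvCutsGE cs i = if pvSep cs i then i :: pvCutsGE cs (i + 1) else pvCutsGE cs (i + 1) := by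
  unfold pvCutsGE
  obtain ⟨m, hm⟩ : ∃ m, cs.length - i = m + 1 := ⟨cs.length - i - 1, by omega⟩
  have hm' : cs.length - (i + 1) = m := by omega
  rw [hm, hm', List.range'_succ, List.filter_cons]

theorem pvCutsGE_mem (cs : List Char) {i c : Nat} (hle : i ≤ cs.length) (h : c ∈ pvCutsGE cs i) :
    i ≤ c ∧ c < cs.length ∧ pvSep cs c = true := by
  unfold pvCutsGE at h
  obtain ⟨hmem, hsep⟩ := List.mem_filter.mp h
  have := List.mem_range'_1.mp hmem
  exact ⟨by omega, by omega, hsep⟩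

theorem pvSep_parts (cs : List Char) {c : Nat} (h : pvSep cs c = true) :
    0 < c ∧ (cs.getD c '?' = '+' ∨ cs.getD c '?' = '-') := by
  simp only [pvSep, Bool.and_eq_true, Bool.or_eq_true, decide_eq_true_eq] at h
  exact ⟨h.1.1, h.1.2⟩

theorem pvGo_shift (cs : List Char) {i : Nat} (hi : i < cs.length) (cur : List Char)
    (l : List Nat) (hl : ∀ c ∈ l, i < c) :
    pvGo cs cur i l = pvGo cs (cur ++ [cs.getD i '?']) (i + 1) l := by
  cases l with
  | nil =>
    simp only [pvGo]
    rw [pvSeg_cons cs hi hi]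
    simp
  | cons c rest =>
    simp only [pvGo]
    rw [pvSeg_cons cs (hl c (by simp)) hi]
    simp

theorem pvTok_eq_go (cs : List Char) :
    ∀ k i cur, cs.length - i ≤ k → i ≤ cs.length →
      pvTok cs i cur = pvGo cs cur i (pvCutsGE cs i) := by
  intro k
  induction k with
  | zero =>
    intro i cur h hle
    have hi : i = cs.length := by omega
    subst hi
    rw [pvTok, pvCutsGE_len]
    simp only [dif_neg (lt_irrefl _)]
    simp [pvGo, pvSeg_self]
  | succ k ih =>
    intro i cur h hle
    by_cases hi : i < cs.length
    · rw [pvTok]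
      simp only [dif_pos hi]
      rw [pvCutsGE_step cs hi]
      cases hsep : pvSep cs i with
      | true =>
        simp only [if_true]
        rw [ih (i + 1) _ (by omega) (by omega)]
        simp [pvGo, pvSeg_self]
      | false =>
        simp only [Bool.false_eq_true, if_false]
        rw [ih (i + 1) _ (by omega) (by omega)]
        rw [pvGo_shift cs hi cur _ ?_]
        intro c hc
        have := pvCutsGE_mem cs (by omega : i + 1 ≤ cs.length) hc
        omega
    · have hieq : i = cs.length := by omega
      subst hieq
      rw [pvTok, pvCutsGE_len]
      simp only [dif_neg (lt_irrefl _)]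
      simp [pvGo, pvSeg_self]

theorem pvSegsFold (cs : List Char) :
    ∀ (bounds : List Nat) (acc : List (List Char)) (p : Nat),
      (bounds.foldl (fun (acc : List (List Char) × Nat) b =>
        (acc.1 ++ [(cs.drop acc.2).take (b - acc.2)], b)) (acc, p)).1
      = acc ++ pvSegsOf cs p bounds := by
  intro bounds
  induction bounds with
  | nil => intro acc p; simp [pvSegsOf]
  | cons b rest ih =>
    intro acc p
    rw [List.foldl_cons, ih]
    simp [pvSegsOf, pvSeg]

theorem pvTailTerms (cs : List Char) :
    ∀ (rest : List Nat) (c : Nat) (acc : List String),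
      c < cs.length →
      (cs.getD c '?' = '+' ∨ cs.getD c '?' = '-') →
      List.IsChain (· < ·) (c :: rest) →
      (∀ x ∈ rest, x < cs.length ∧ (cs.getD x '?' = '+' ∨ cs.getD x '?' = '-')) →
      (pvSegsOf cs c (rest ++ [cs.length])).foldl
        (fun terms seg =>
          if PySem.Chars.strip (if seg.headD '?' = '+' then seg.tail else seg) ≠ [] then
            terms ++ [String.ofList (PySem.Chars.strip (if seg.headD '?' = '+' then seg.tail else seg))]
          else terms) acc
      = acc ++ pvGo cs (pvSign cs c) (c + 1) rest := by
  intro rest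
  induction rest with
  | nil =>
    intro c acc hc hsig _ _
    simp only [List.nil_append, pvSegsOf, List.foldl_cons, List.foldl_nil]
    rw [pvSeg_cons cs hc hc]
    rcases hsig with hp | hp
    · simp only [hp, List.headD_cons, if_pos rfl, List.tail_cons, pvGo, pvSign]
      simp only [if_neg (by decide : ¬('+' = '-'))]
      by_cases ht : PySem.Chars.strip (pvSeg cs (c + 1) cs.length) ≠ [] <;>
        simp [pvEmit, ht]
    · simp only [hp, List.headD_cons, if_neg (by decide : ¬('-' = '+')), pvGo, pvSign, if_pos rfl]
      by_cases ht : PySem.Chars.strip ('-' :: pvSeg cs (c + 1) cs.length) ≠ [] <;>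
        simp [pvEmit, ht]
  | cons c' rest' ih =>
    intro c acc hc hsig hch hmem
    simp only [List.cons_append, pvSegsOf, List.foldl_cons]
    have hcc' : c < c' := (List.isChain_cons_cons.mp hch).1
    rw [pvSeg_cons cs hcc' hc]
    rw [ih c' _ (hmem c' (by simp)).1 (hmem c' (by simp)).2
        (List.isChain_cons_cons.mp hch).2 (fun x hx => hmem x (by simp [hx]))]
    have hgo : pvGo cs (pvSign cs c) (c + 1) (c' :: rest')
        = pvEmit (pvSign cs c ++ pvSeg cs (c + 1) c') ++ pvGo cs (pvSign cs c') (c' + 1) rest' := by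
      simp [pvGo]
    rw [hgo]
    rcases hsig with hp | hp
    · simp only [hp, List.headD_cons, if_pos rfl, List.tail_cons, pvSign]
      simp only [if_neg (by decide : ¬('+' = '-'))]
      by_cases ht : PySem.Chars.strip (pvSeg cs (c + 1) c') ≠ [] <;>
        simp [pvEmit, ht]
    · simp only [hp, List.headD_cons, if_neg (by decide : ¬('-' = '+')), pvSign, if_pos rfl]
      by_cases ht : PySem.Chars.strip ('-' :: pvSeg cs (c + 1) c') ≠ [] <;>
        simp [pvEmit, ht]

theorem pvAlt_eq_go (cs : List Char) (cuts : List Nat)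
    (hch : List.IsChain (· < ·) cuts)
    (hmem : ∀ c ∈ cuts, 0 < c ∧ c < cs.length ∧ (cs.getD c '?' = '+' ∨ cs.getD c '?' = '-')) :
    (let n := cs.length
     let bounds := cuts ++ [n]
     let segments := (bounds.foldl (fun (acc : List (List Char) × Nat) b =>
        (acc.1 ++ [(cs.drop acc.2).take (b - acc.2)], b)) ([], 0)).1
     let t0 := PySem.Chars.strip (segments.headD [])
     let terms0 := if t0 ≠ [] then [String.ofList t0] else []
     segments.tail.foldl (fun terms seg =>
       let body := if seg.headD '?' = '+' then seg.tail else seg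
       let t := PySem.Chars.strip body
       if t ≠ [] then terms ++ [String.ofList t] else terms) terms0)
    = pvGo cs [] 0 cuts := by
  dsimp only
  rw [pvSegsFold]
  cases cuts with
  | nil =>
    simp only [List.nil_append, pvSegsOf, List.headD_cons, List.tail_cons, List.foldl_nil]
    by_cases ht : PySem.Chars.strip (pvSeg cs 0 cs.length) ≠ [] <;>
      simp [pvGo, pvEmit, ht, pvSeg]
  | cons c rest =>
    simp only [List.cons_append, pvSegsOf, List.nil_append, List.headD_cons, List.tail_cons]
    rw [pvTailTerms cs rest c _ (hmem c (by simp)).2.1 (hmem c (by simp)).2.2 hch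
        (fun x hx => ⟨(hmem x (by simp [hx])).2.1, (hmem x (by simp [hx])).2.2⟩)]
    have hgo : pvGo cs [] 0 (c :: rest)
        = pvEmit ([] ++ pvSeg cs 0 c) ++ pvGo cs (pvSign cs c) (c + 1) rest := by
      simp [pvGo]
    rw [hgo]
    by_cases ht : PySem.Chars.strip (pvSeg cs 0 c) ≠ [] <;>
      simp [pvEmit, ht, pvSeg]

-- ===== VERDICT (by name: the statement is the Claim_ definition above) =====
theorem tokenize_polynomial_py_spec : Claim_equal_tokenize_polynomial_py := by
  intro poly_str var _
  unfold Spec_tokenize_polynomial_py tokenize_polynomial_py tokenize_polynomial_py_alt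
  set cs := PySem.Chars.strip poly_str.toList with hcs
  have hchain : List.IsChain (· < ·) (pvCutsB cs) := by
    rw [pvCutsB_eq]
    exact (List.Pairwise.filter _ (List.pairwise_lt_range' 1)).isChain
  have hmem : ∀ c ∈ pvCutsB cs, 0 < c ∧ c < cs.length ∧ (cs.getD c '?' = '+' ∨ cs.getD c '?' = '-') := by
    intro c hc
    rw [pvCutsB_eq] at hc
    obtain ⟨-, hlt, hsep⟩ := pvCutsGE_mem cs (Nat.zero_le _) hc
    obtain ⟨hz, hpm⟩ := pvSep_parts cs hsep
    exact ⟨hz, hlt, hpm⟩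
  rw [pvLoopA_eq cs cs.length 0 [] [] (by omega), List.nil_append,
      pvTok_eq_go cs cs.length 0 [] (by omega) (by omega), ← pvCutsB_eq]
  exact (pvAlt_eq_go cs (pvCutsB cs) hchain hmem).symm
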